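-- pv_equiv track=rewrite | github.com/rkudipud/chopper | src/chopper/validator/functions.py | _brace_delta
-- ===== SOURCE A (Python) =====
-- def _brace_delta(text: str) -> int:
--     """Return ``count('{') - count('}')`` ignoring backslash-escaped braces.
--
--     This is a minimal-sufficient check for the internal-consistency
--     assertion VE-16. Full Tcl tokenisation (quotes, comments,
--     here-docs) is not required because the parser's P2 pass is the
--     authoritative brace checker; at P6 we only need to detect the
--     trimmer having introduced new imbalance.
--     """
--
--     depth = 0
--     i = 0
--     while i < len(text):
--         ch = text[i]
--         if ch == "\\" and i + 1 < len(text):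
--             i += 2
--             continue
--         if ch == "{":
--             depth += 1
--         elif ch == "}":
--             depth -= 1
--         i += 1
--     return depth
-- ===== SOURCE B (Python) =====
-- def _brace_delta(text: str) -> int:
--     """Split at each backslash with str.partition, count braces per
--     backslash-free segment, and drop the escaped character after each cut."""
--     delta = 0
--     while True:
--         head, sep, text = text.partition("\\")
--         delta += head.count("{") - head.count("}")
--         if not sep:
--             return delta
--         text = text[1:]
-- ===== Notes on version B (the rewrite author's own statement) =====
-- stated objective: faster
-- what changed: Replaced the index-driven char-by-char scan that maintains a depth counter and skips escape pairs by index arithmetic with a segment loop: str.partition cuts the text at each backslash, each backslash-free segment is counted with two str.count calls, and the escaped character is dropped after the cut; the per-character work moves from Python bytecode into C-implemented str.partition/str.count.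
import Mathlib
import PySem

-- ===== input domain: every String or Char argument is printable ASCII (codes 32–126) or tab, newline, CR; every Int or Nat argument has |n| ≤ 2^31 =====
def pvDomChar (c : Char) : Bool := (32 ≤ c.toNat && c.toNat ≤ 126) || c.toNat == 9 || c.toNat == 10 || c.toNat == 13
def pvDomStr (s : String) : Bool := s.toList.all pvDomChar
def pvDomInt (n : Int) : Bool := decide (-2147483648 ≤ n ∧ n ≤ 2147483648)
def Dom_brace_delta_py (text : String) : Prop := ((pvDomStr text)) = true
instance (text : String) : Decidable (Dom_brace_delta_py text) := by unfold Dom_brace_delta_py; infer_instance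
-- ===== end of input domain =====

-- B replaces A's index-driven escape-skipping scan with a partition-into-segments loop (C-level str.partition/str.count do the per-char work); measured faster in a timing run.


-- ===== PORT A =====
-- A's 'while i < len(text)' index loop, transcribed as structural recursion on the
-- suffix of characters still to scan (state: remaining suffix, depth accumulator).
-- 'i += 2' with 'i + 1 < len(text)' is the step to rest.tail when rest ≠ [].
def braceLoop : List Char → Int → Int
  | [], depth => depth
  | c :: rest, depth =>
    if c = '\\' ∧ rest ≠ [] then braceLoop rest.tail depth
    else braceLoop rest (if c = '{' then depth + 1 else if c = '}' then depth - 1 else depth)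
termination_by cs _ => cs.length
decreasing_by
  · simp [List.length_tail]
  · simp

def brace_delta_py (text : String) : Int := braceLoop text.toList 0

-- ===== PORT B =====
-- Source B's 'while True' partition loop. text.partition("\\") with the one-char separator
-- is exactly (takeWhile (· ≠ '\\'), dropWhile (· ≠ '\\')): head = part before the first
-- backslash, the dropWhile part starts with the separator iff one was found (sep truthy).
-- head.count("{") on a one-char needle is exactly List.count '{' head.  text[1:] = List.drop 1.
def braceAltLoop : List Char → Int → Int
  | cs, delta =>
    let head := cs.takeWhile (· ≠ '\\')
    let delta' := delta + ((head.count '{' : Int) - (head.count '}' : Int))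
    match h : cs.dropWhile (· ≠ '\\') with
    | [] => delta'
    | _ :: rest => braceAltLoop (rest.drop 1) delta'
termination_by cs _ => cs.length
decreasing_by
  have hle := List.length_dropWhile_le (p := fun c => decide (c ≠ '\\')) (l := cs)
  rw [h] at hle
  simp at hle ⊢
  omega

def brace_delta_py_alt (text : String) : Int := braceAltLoop text.toList 0

-- ===== PRECONDITION & SPEC =====
def Spec_brace_delta_py (text : String) (out : Int) : Prop := out = brace_delta_py_alt text
instance (text : String) (out : Int) : Decidable (Spec_brace_delta_py text out) := by unfold Spec_brace_delta_py; infer_instance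

-- ===== CLAIM (what is proved, stated in full; the proofs are below) =====
def Claim_equal_brace_delta_py : Prop := ∀ (text : String), Dom_brace_delta_py text → Spec_brace_delta_py text (brace_delta_py text)

-- ===== LEMMAS AND PROOFS =====

-- The first element surviving dropWhile fails the predicate.
theorem pvDropWhileHeadFalse {α : Type} (p : α → Bool) :
    ∀ (l : List α) (b : α) (rest : List α), l.dropWhile p = b :: rest → p b = false := by
  intro l
  induction l with
  | nil => intro b rest h; simp at h
  | cons a t ih =>
    intro b rest h
    by_cases hp : p a
    · rw [List.dropWhile_cons_of_pos hp] at h; exact ih _ _ h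
    · rw [List.dropWhile_cons_of_neg hp] at h
      cases h; simpa using hp

-- A's scan over a backslash-free prefix just accumulates the brace counts of that prefix.
theorem braceLoop_append_free (h : List Char) (t : List Char) (d : Int)
    (hfree : '\\' ∉ h) :
    braceLoop (h ++ t) d = braceLoop t (d + ((h.count '{' : Int) - (h.count '}' : Int))) := by
  induction h generalizing d with
  | nil => simp [List.count_nil]
  | cons c h' ih =>
    have hc : c ≠ '\\' := fun hc => hfree (hc ▸ List.mem_cons_self)
    have hfree' : '\\' ∉ h' := fun hm => hfree (List.mem_cons_of_mem _ hm)
    rw [List.cons_append, braceLoop]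
    simp only [hc, false_and, if_false]
    rw [ih _ hfree']
    by_cases h1 : c = '{'
    · simp [h1]; ring_nf
    · by_cases h2 : c = '}'
      · simp [h2]; ring_nf
      · simp [h1, h2]

theorem braceAltLoop_eq (cs : List Char) (d : Int) :
    braceAltLoop cs d = braceLoop cs d := by
  induction hn : cs.length using Nat.strong_induction_on generalizing cs d with
  | _ n ih =>
  subst hn
  have hsplit : cs.takeWhile (· ≠ '\\') ++ cs.dropWhile (· ≠ '\\') = cs :=
    List.takeWhile_append_dropWhile
  have hfree : '\\' ∉ cs.takeWhile (· ≠ '\\') := fun hm => by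
    simpa using List.mem_takeWhile_imp hm
  rw [braceAltLoop]
  cases hdw : cs.dropWhile (· ≠ '\\') with
  | nil =>
    rw [hdw, List.append_nil] at hsplit
    conv_rhs => rw [← hsplit]
    have hstep := braceLoop_append_free (cs.takeWhile (· ≠ '\\')) [] d hfree
    rw [List.append_nil] at hstep
    rw [hstep, braceLoop]
  | cons b rest =>
    have hb : b = '\\' := by
      simpa using pvDropWhileHeadFalse (fun c => decide (c ≠ '\\')) cs b rest hdw
    have hlen : cs.length = (cs.takeWhile (· ≠ '\\')).length + (b :: rest).length := by
      conv_lhs => rw [← hsplit, hdw]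
      simp
    conv_rhs => rw [← hsplit, hdw]
    rw [braceLoop_append_free _ _ _ hfree]
    subst hb
    cases rest with
    | nil =>
      rw [braceLoop]
      simp only [ne_eq, not_true_eq_false, and_false, if_false]
      simp [braceLoop, braceAltLoop]
    | cons x rest' =>
      rw [braceLoop]
      rw [if_pos (show ('\\' = '\\' ∧ (x :: rest') ≠ []) from ⟨rfl, by simp⟩)]
      simp only [List.drop_succ_cons, List.drop_zero, List.tail_cons]
      exact ih rest'.length (by simp at hlen; omega) rest' _ rfl

-- ===== VERDICT (by name: the statement is the Claim_ definition above) =====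
theorem brace_delta_py_spec : Claim_equal_brace_delta_py := by
  intro text _
  unfold Spec_brace_delta_py brace_delta_py brace_delta_py_alt
  rw [braceAltLoop_eq]
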